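-- pv_equiv track=rewrite | github.com/kolesnykovVladyslav/advent-of-code-2023 | task9/task9.py | solve_b
-- ===== SOURCE A (Python) =====
-- def solve_b(all_histories):
--     sum = 0
--     for histories in all_histories:
--         for i in range(len(histories) - 2, -1, -1):
--             value1 = histories[i][0]
--             value2 = histories[i + 1][0]
--             histories[i].insert(0, value1 - value2)
--         sum += histories[0][0]
--     return sum
-- ===== SOURCE B (Python) =====
-- def solve_b(all_histories):
--     total = 0
--     for histories in all_histories:
--         acc = 0
--         sign = 1
--         for row in histories:
--             acc += sign * row[0]
--             sign = -sign
--         total += acc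
--     return total
-- ===== Notes on version B (the rewrite author's own statement) =====
-- stated objective: simpler
-- what changed: Replaces the bottom-up front-insertion mutation of every row with a direct alternating-sign sum of each row's first element (the leftmost extrapolated value equals row0[0]-row1[0]+row2[0]-...), keeping only a running total and a sign; B does not mutate its argument.
import Mathlib
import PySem

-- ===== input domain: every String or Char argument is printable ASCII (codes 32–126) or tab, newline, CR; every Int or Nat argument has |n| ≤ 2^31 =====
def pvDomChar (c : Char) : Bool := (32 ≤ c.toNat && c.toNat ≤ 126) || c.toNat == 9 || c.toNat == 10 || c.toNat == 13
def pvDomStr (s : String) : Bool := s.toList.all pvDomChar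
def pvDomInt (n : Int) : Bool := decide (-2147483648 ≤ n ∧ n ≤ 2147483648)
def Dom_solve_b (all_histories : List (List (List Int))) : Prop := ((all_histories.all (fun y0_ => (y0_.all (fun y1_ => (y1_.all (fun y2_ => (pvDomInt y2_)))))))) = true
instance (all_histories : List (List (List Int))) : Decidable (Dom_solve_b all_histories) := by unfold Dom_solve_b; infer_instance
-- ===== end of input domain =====

-- B computes the leftmost backward-extrapolated value as an alternating sum of each row's
-- first element (simpler: no mutation, no front inserts); A mutates its argument's rows in
-- place (insert at the front) — the equivalence proved here is about the return value only.

-- ===== PORT A =====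
-- one loop step of A's inner 'for i in range(len(histories)-2, -1, -1)' body
def pvStepA (hs : List (List Int)) (i : Int) : List (List Int) :=
  let value1 := PySem.List.pyGetD (PySem.List.pyGetD hs i []) 0 0
  let value2 := PySem.List.pyGetD (PySem.List.pyGetD hs (i + 1) []) 0 0
  PySem.List.pySetD hs i (PySem.List.insert (PySem.List.pyGetD hs i []) 0 (value1 - value2))

-- the body of A's outer 'for histories in all_histories' loop
def pvBodyA (sum : Int) (histories : List (List Int)) : Int :=
  let histories :=
    (PySem.List.pyRange ((histories.length : Int) - 2) (-1) (-1)).foldl pvStepA histories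
  sum + PySem.List.pyGetD (PySem.List.pyGetD histories 0 []) 0 0

def solve_b (all_histories : List (List (List Int))) : Int :=
  all_histories.foldl pvBodyA 0

-- ===== PORT B =====
-- the body of B's outer loop: acc/sign pair fold over the rows, then total += acc
def pvBodyB (total : Int) (histories : List (List Int)) : Int :=
  let p := histories.foldl
    (fun (st : Int × Int) row => (st.1 + st.2 * PySem.List.pyGetD row 0 0, -st.2)) (0, 1)
  total + p.1

def solve_b_alt (all_histories : List (List (List Int))) : Int :=
  all_histories.foldl pvBodyB 0

-- ===== PRECONDITION & SPEC =====
-- Pre_ excludes exactly the inputs on which Python A raises IndexError: an empty history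
-- (histories[0][0]) or a history containing an empty row (histories[i][0]).
def Pre_solve_b (all_histories : List (List (List Int))) : Prop :=
  ∀ h ∈ all_histories, h ≠ [] ∧ ∀ row ∈ h, row ≠ []
instance (all_histories : List (List (List Int))) : Decidable (Pre_solve_b all_histories) := by
  unfold Pre_solve_b; infer_instance
def pvWitness_solve_b : List (List (List Int)) := [[[0, 3, 6], [3, 3], [0]]]

def Spec_solve_b (all_histories : List (List (List Int))) (out : Int) : Prop := out = solve_b_alt all_histories
instance (all_histories : List (List (List Int))) (out : Int) : Decidable (Spec_solve_b all_histories out) := by unfold Spec_solve_b; infer_instance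

-- ===== CLAIM (what is proved, stated in full; the proofs are below) =====
def Claim_equal_solve_b : Prop := ∀ (all_histories : List (List (List Int))), Dom_solve_b all_histories → Pre_solve_b all_histories → Spec_solve_b all_histories (solve_b all_histories)

-- ===== LEMMAS AND PROOFS =====

-- first element with Python default 0
def pvHd (row : List Int) : Int := PySem.List.pyGetD row 0 0

-- alternating sum h0 - (h1 - (h2 - ...)) = h0 - h1 + h2 - ...
def pvAlt (l : List Int) : Int := l.foldr (· - ·) 0

theorem pvAlt_append_sub (l : List Int) (x y : Int) :
    pvAlt (l ++ [x - y]) = pvAlt (l ++ [x, y]) := by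
  induction l with
  | nil => simp [pvAlt]
  | cons a l ih =>
      simp only [pvAlt, List.cons_append, List.foldr] at ih ⊢
      omega

theorem pvB_inner (l : List (List Int)) (t s : Int) :
    (l.foldl (fun (st : Int × Int) row => (st.1 + st.2 * PySem.List.pyGetD row 0 0, -st.2)) (t, s)).1
      = t + s * pvAlt (l.map pvHd) := by
  induction l generalizing t s with
  | nil => simp [pvAlt]
  | cons a l ih => simp [List.foldl, pvAlt, pvHd] at ih ⊢; rw [ih]; ring

theorem pvTake_succ_set (l : List Int) (m : Nat) (x : Int) (h : m < l.length) :
    (l.set m x).take (m + 1) = l.take m ++ [x] := by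
  induction l generalizing m with
  | nil => simp at h
  | cons a l ih =>
    cases m with
    | zero => simp
    | succ m => simp only [List.set, List.take, List.length_cons] at h ⊢
                rw [ih m (by omega)]; simp

theorem pvTake_succ (l : List Int) (m : Nat) (h : m < l.length) :
    l.take (m + 1) = l.take m ++ [l[m]] := by
  rw [List.take_add_one]; simp [List.getElem?_eq_getElem h]

theorem pvA_loop (m : Nat) (hs : List (List Int)) (h : m < hs.length) :
    pvHd (PySem.List.pyGetD
        ((PySem.List.pyRange ((m : Int) - 1) (-1) (-1)).foldl pvStepA hs) 0 [])
      = pvAlt ((hs.map pvHd).take (m + 1)) := by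
  induction m generalizing hs with
  | zero =>
    rw [PySem.List.pyRange_neg_one_eq_nil (by omega)]
    cases hs with
    | nil => simp at h
    | cons a l => simp [pvAlt, pvHd]
  | succ m ih =>
    have hcons : PySem.List.pyRange ((↑(m + 1) : Int) - 1) (-1) (-1)
        = ((m : Int)) :: PySem.List.pyRange ((m : Int) - 1) (-1) (-1) := by
      have := PySem.List.pyRange_neg_one_cons (a := ((m + 1 : Nat) : Int) - 1) (b := -1) (by push_cast; omega)
      simpa [sub_eq_iff_eq_add] using this
    rw [hcons, List.foldl_cons]
    have hlen : (pvStepA hs (m : Int)).length = hs.length := by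
      simp [pvStepA]
    rw [ih (pvStepA hs (m : Int)) (by omega)]
    -- compute the heads after the step
    have hm : m < hs.length := by omega
    have hm1 : m + 1 < hs.length := h
    have hstep : (pvStepA hs (m : Int)).map pvHd
        = (hs.map pvHd).set m ((hs.map pvHd)[m]'(by simpa) - (hs.map pvHd)[m + 1]'(by simpa)) := by
      simp only [pvStepA]
      rw [PySem.List.pySetD_natCast]
      rw [List.map_set]
      congr 1
      have e1 : PySem.List.pyGetD hs ((m : Int)) ([] : List Int) = hs[m] := by
        rw [PySem.List.pyGetD_natCast]; simp [List.getD, List.getElem?_eq_getElem hm]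
      have e2 : PySem.List.pyGetD hs ((m : Int) + 1) ([] : List Int) = hs[m + 1] := by
        have : ((m : Int) + 1) = ((m + 1 : Nat) : Int) := by push_cast; ring
        rw [this, PySem.List.pyGetD_natCast]
        simp [List.getD, List.getElem?_eq_getElem hm1]
      rw [e1, e2, PySem.List.insert_zero]
      simp [pvHd]
    rw [hstep]
    rw [pvTake_succ_set _ _ _ (by simpa)]
    rw [show m + 1 + 1 = (m + 1) + 1 from rfl, pvTake_succ _ (m + 1) (by simpa),
        pvTake_succ _ m (by simp; omega)]
    rw [List.append_assoc]
    exact pvAlt_append_sub _ _ _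

theorem pv_per_history (histories : List (List Int)) (hne : histories ≠ []) :
    PySem.List.pyGetD (PySem.List.pyGetD
        ((PySem.List.pyRange ((histories.length : Int) - 2) (-1) (-1)).foldl pvStepA histories) 0 []) 0 0
      = (histories.foldl (fun (st : Int × Int) row => (st.1 + st.2 * PySem.List.pyGetD row 0 0, -st.2)) (0, 1)).1 := by
  have hlen : 1 ≤ histories.length := by
    cases histories with
    | nil => simp at hne
    | cons a l => simp
  have hm : histories.length - 1 < histories.length := by omega
  have hcast : ((histories.length : Int) - 2) = ((histories.length - 1 : Nat) : Int) - 1 := by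
    omega
  rw [hcast]
  have := pvA_loop (histories.length - 1) histories hm
  rw [show histories.length - 1 + 1 = histories.length from by omega] at this
  rw [List.take_of_length_le (by simp)] at this
  rw [pvB_inner]
  simpa [pvHd] using this

theorem pv_fold (all_histories : List (List (List Int)))
    (hne : ∀ h ∈ all_histories, h ≠ []) (t : Int) :
    all_histories.foldl pvBodyA t = all_histories.foldl pvBodyB t := by
  induction all_histories generalizing t with
  | nil => rfl
  | cons a l ih =>
    simp only [List.foldl_cons]
    have hb : pvBodyA t a = pvBodyB t a := by
      simp only [pvBodyA, pvBodyB]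
      rw [pv_per_history a (hne a (by simp))]
    rw [hb]
    exact ih (fun h hm => hne h (by simp [hm])) _

-- ===== VERDICT (by name: the statement is the Claim_ definition above) =====
theorem solve_b_spec : Claim_equal_solve_b := by
  intro all _ hpre
  unfold Spec_solve_b solve_b solve_b_alt
  exact pv_fold all (fun h hm => (hpre h hm).1) 0
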